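-- pv_equiv track=rewrite | github.com/peaceghost-hub/RobotControl | dashboard/ai_vision.py | _parse_nav_decision
-- ===== SOURCE A (Python) =====
-- from typing import Optional, Dict, Any, Callable, List
--
-- def _parse_nav_decision(text: str) -> Dict[str, str]:
--     safety = "DANGER"
--     direction = "STOP"
--     obstacle_type = "unknown"
--     obstacle_position = "unknown"
--     clear_path = "unknown"
--     confidence = "low"
--     reason = "Could not parse AI response"
--
--     if not text:
--         return {
--             "safety": safety, "direction": direction,
--             "obstacle_type": obstacle_type,
--             "obstacle_position": obstacle_position,
--             "clear_path": clear_path,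
--             "confidence": confidence,
--             "reason": reason,
--         }
--
--     valid_obstacles = (
--         "WALL", "ROCK", "FURNITURE", "PERSON", "HOLE",
--         "STEP", "VEGETATION", "NONE",
--     )
--     valid_positions = ("LEFT", "CENTER", "RIGHT", "NONE")
--
--     for line in text.strip().splitlines():
--         upper = line.strip().upper()
--         if upper.startswith("SAFETY:"):
--             val = upper.split(":", 1)[1].strip()
--             if val in ("SAFE", "CAUTION", "DANGER"):
--                 safety = val
--         elif upper.startswith("DIRECTION:"):
--             val = upper.split(":", 1)[1].strip()
--             if val in ("FORWARD", "LEFT", "RIGHT", "STOP"):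
--                 direction = val
--         elif upper.startswith("OBSTACLE_TYPE:"):
--             val = upper.split(":", 1)[1].strip()
--             if val in valid_obstacles:
--                 obstacle_type = val.lower()
--         elif upper.startswith("OBSTACLE_POSITION:"):
--             val = upper.split(":", 1)[1].strip()
--             if val in valid_positions:
--                 obstacle_position = val.lower()
--         elif upper.startswith("CLEAR_PATH:"):
--             val = upper.split(":", 1)[1].strip()
--             if val in valid_positions:
--                 clear_path = val.lower()
--         elif upper.startswith("CONFIDENCE:"):
--             val = upper.split(":", 1)[1].strip()
--             if val in ("HIGH", "MEDIUM", "LOW"):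
--                 confidence = val.lower()
--         elif upper.startswith("REASON:"):
--             reason = line.strip().split(":", 1)[1].strip()
--
--     return {
--         "safety": safety, "direction": direction,
--         "obstacle_type": obstacle_type,
--         "obstacle_position": obstacle_position,
--         "clear_path": clear_path,
--         "confidence": confidence,
--         "reason": reason,
--     }
-- ===== SOURCE B (Python) =====
-- def _parse_nav_decision(text: str):
--     lines = [l.strip() for l in text.strip().splitlines()]
--     rev = lines[::-1]
--
--     def last(key, allowed, default):
--         prefix = key + ":"
--         for l in rev:
--             u = l.upper()
--             if u.startswith(prefix):
--                 v = u[len(prefix):].strip()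
--                 if v in allowed:
--                     return v
--         return default
--
--     def last_reason():
--         for l in rev:
--             if l.upper().startswith("REASON:"):
--                 return l.split(":", 1)[1].strip()
--         return "Could not parse AI response"
--
--     return {
--         "safety": last("SAFETY", ("SAFE", "CAUTION", "DANGER"), "DANGER"),
--         "direction": last("DIRECTION", ("FORWARD", "LEFT", "RIGHT", "STOP"), "STOP"),
--         "obstacle_type": last("OBSTACLE_TYPE",
--                               ("WALL", "ROCK", "FURNITURE", "PERSON", "HOLE",
--                                "STEP", "VEGETATION", "NONE"), "UNKNOWN").lower(),
--         "obstacle_position": last("OBSTACLE_POSITION",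
--                                   ("LEFT", "CENTER", "RIGHT", "NONE"), "UNKNOWN").lower(),
--         "clear_path": last("CLEAR_PATH",
--                            ("LEFT", "CENTER", "RIGHT", "NONE"), "UNKNOWN").lower(),
--         "confidence": last("CONFIDENCE", ("HIGH", "MEDIUM", "LOW"), "LOW").lower(),
--         "reason": last_reason(),
--     }
-- ===== Notes on version B (the rewrite author's own statement) =====
-- stated objective: alternative
-- what changed: B replaces A's forward single-pass state machine (seven mutable locals updated through an if/elif chain, last valid occurrence winning) with seven independent backward searches: it reverses the stripped lines once and, per field, scans for the first line whose uppercased key prefix matches and whose value is in that field's allowed set, returning it immediately (first-valid-in-reverse = last-valid-forward), with REASON found by a separate unvalidated backward search on the original-case line.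
import Mathlib
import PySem

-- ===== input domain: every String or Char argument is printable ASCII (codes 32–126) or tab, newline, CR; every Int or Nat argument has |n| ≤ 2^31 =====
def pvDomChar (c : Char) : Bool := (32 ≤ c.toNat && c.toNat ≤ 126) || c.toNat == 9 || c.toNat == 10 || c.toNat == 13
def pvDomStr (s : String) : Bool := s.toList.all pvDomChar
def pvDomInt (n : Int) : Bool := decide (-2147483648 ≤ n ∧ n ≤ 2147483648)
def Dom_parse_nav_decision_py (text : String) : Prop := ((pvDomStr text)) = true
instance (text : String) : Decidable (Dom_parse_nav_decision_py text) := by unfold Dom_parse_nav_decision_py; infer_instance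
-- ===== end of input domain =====

-- B replaces A's forward single-pass state machine by seven independent backward searches over the
-- reversed stripped lines, each returning the first valid hit (= A's last valid occurrence)
-- (objective: alternative; same cost).

-- ===== PORT A =====

/-- A's mutable locals (safety, direction, …, reason) as one record. -/
structure PvSt where
  safety : String
  direction : String
  obstacle_type : String
  obstacle_position : String
  clear_path : String
  confidence : String
  reason : String
deriving DecidableEq, Repr

def pvDefaults : PvSt :=
  ⟨"DANGER", "STOP", "unknown", "unknown", "unknown", "low", "Could not parse AI response"⟩

/-- the dict literal A returns (same key order in both of A's return statements) -/
def pvRender (st : PvSt) : List (String × String) :=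
  [("safety", st.safety), ("direction", st.direction),
   ("obstacle_type", st.obstacle_type),
   ("obstacle_position", st.obstacle_position),
   ("clear_path", st.clear_path),
   ("confidence", st.confidence),
   ("reason", st.reason)]

def pvValidObstacles : List (List Char) :=
  ["WALL".toList, "ROCK".toList, "FURNITURE".toList, "PERSON".toList, "HOLE".toList,
   "STEP".toList, "VEGETATION".toList, "NONE".toList]

def pvValidPositions : List (List Char) :=
  ["LEFT".toList, "CENTER".toList, "RIGHT".toList, "NONE".toList]

/-- One iteration of A's for-loop body (the `.split(":", 1)[1]` index is always in range because
    the guarding `startswith` test saw a ':', so `getD 1 []` is exact there). -/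
def pvStepA (st : PvSt) (line : List Char) : PvSt :=
  let upper := PySem.Chars.upper (PySem.Chars.strip line)
  if PySem.Chars.startswith upper "SAFETY:".toList then
    let val := PySem.Chars.strip ((PySem.Chars.splitOnMax upper [':'] 1).getD 1 [])
    if ["SAFE".toList, "CAUTION".toList, "DANGER".toList].contains val then
      { st with safety := String.ofList val } else st
  else if PySem.Chars.startswith upper "DIRECTION:".toList then
    let val := PySem.Chars.strip ((PySem.Chars.splitOnMax upper [':'] 1).getD 1 [])
    if ["FORWARD".toList, "LEFT".toList, "RIGHT".toList, "STOP".toList].contains val then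
      { st with direction := String.ofList val } else st
  else if PySem.Chars.startswith upper "OBSTACLE_TYPE:".toList then
    let val := PySem.Chars.strip ((PySem.Chars.splitOnMax upper [':'] 1).getD 1 [])
    if pvValidObstacles.contains val then
      { st with obstacle_type := String.ofList (PySem.Chars.lower val) } else st
  else if PySem.Chars.startswith upper "OBSTACLE_POSITION:".toList then
    let val := PySem.Chars.strip ((PySem.Chars.splitOnMax upper [':'] 1).getD 1 [])
    if pvValidPositions.contains val then
      { st with obstacle_position := String.ofList (PySem.Chars.lower val) } else st
  else if PySem.Chars.startswith upper "CLEAR_PATH:".toList then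
    let val := PySem.Chars.strip ((PySem.Chars.splitOnMax upper [':'] 1).getD 1 [])
    if pvValidPositions.contains val then
      { st with clear_path := String.ofList (PySem.Chars.lower val) } else st
  else if PySem.Chars.startswith upper "CONFIDENCE:".toList then
    let val := PySem.Chars.strip ((PySem.Chars.splitOnMax upper [':'] 1).getD 1 [])
    if ["HIGH".toList, "MEDIUM".toList, "LOW".toList].contains val then
      { st with confidence := String.ofList (PySem.Chars.lower val) } else st
  else if PySem.Chars.startswith upper "REASON:".toList then
    { st with reason :=
        String.ofList (PySem.Chars.strip
          ((PySem.Chars.splitOnMax (PySem.Chars.strip line) [':'] 1).getD 1 [])) }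
  else st

def parse_nav_decision_py (text : String) : List (String × String) :=
  if text.toList = [] then pvRender pvDefaults
  else
    pvRender
      ((PySem.Chars.splitlines (PySem.Chars.strip text.toList)).foldl pvStepA pvDefaults)

-- ===== PORT B =====

/-- Source B's inner function `last(key, allowed, default)`: walk the reversed (pre-stripped) lines,
    return the first valid value for `key` (uppercased), else the default. -/
def pvLast (rev : List (List Char)) (key : List Char) (allowed : List (List Char))
    (dflt : String) : String :=
  match rev with
  | [] => dflt
  | l :: rest =>
    let u := PySem.Chars.upper l
    if PySem.Chars.startswith u (key ++ [':']) then
      let v := PySem.Chars.strip (PySem.List.slice u (some (((key ++ [':']).length : Int))) none)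
      if allowed.contains v then String.ofList v else pvLast rest key allowed dflt
    else pvLast rest key allowed dflt

/-- Source B's inner function `last_reason()` (value taken from the original-case line). -/
def pvLastReason (rev : List (List Char)) : String :=
  match rev with
  | [] => "Could not parse AI response"
  | l :: rest =>
    if PySem.Chars.startswith (PySem.Chars.upper l) "REASON:".toList then
      String.ofList (PySem.Chars.strip ((PySem.Chars.splitOnMax l [':'] 1).getD 1 []))
    else pvLastReason rest

def parse_nav_decision_py_alt (text : String) : List (String × String) :=
  let lines := (PySem.Chars.splitlines (PySem.Chars.strip text.toList)).map PySem.Chars.strip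
  -- lines[::-1]: step -1 never raises, so getD [] is exact (PySem.List.slice?_none_none_neg_one)
  let rev := (PySem.List.slice? lines none none (-1)).getD []
  [("safety", pvLast rev "SAFETY".toList
      ["SAFE".toList, "CAUTION".toList, "DANGER".toList] "DANGER"),
   ("direction", pvLast rev "DIRECTION".toList
      ["FORWARD".toList, "LEFT".toList, "RIGHT".toList, "STOP".toList] "STOP"),
   ("obstacle_type", PySem.Str.lower (pvLast rev "OBSTACLE_TYPE".toList
      ["WALL".toList, "ROCK".toList, "FURNITURE".toList, "PERSON".toList, "HOLE".toList,
       "STEP".toList, "VEGETATION".toList, "NONE".toList] "UNKNOWN")),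
   ("obstacle_position", PySem.Str.lower (pvLast rev "OBSTACLE_POSITION".toList
      ["LEFT".toList, "CENTER".toList, "RIGHT".toList, "NONE".toList] "UNKNOWN")),
   ("clear_path", PySem.Str.lower (pvLast rev "CLEAR_PATH".toList
      ["LEFT".toList, "CENTER".toList, "RIGHT".toList, "NONE".toList] "UNKNOWN")),
   ("confidence", PySem.Str.lower (pvLast rev "CONFIDENCE".toList
      ["HIGH".toList, "MEDIUM".toList, "LOW".toList] "LOW")),
   ("reason", pvLastReason rev)]

-- ===== PRECONDITION & SPEC =====
def Spec_parse_nav_decision_py (text : String) (out : List (String × String)) : Prop := out = parse_nav_decision_py_alt text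
instance (text : String) (out : List (String × String)) : Decidable (Spec_parse_nav_decision_py text out) := by unfold Spec_parse_nav_decision_py; infer_instance

-- ===== CLAIM (what is proved, stated in full; the proofs are below) =====
def Claim_equal_parse_nav_decision_py : Prop := ∀ (text : String), Dom_parse_nav_decision_py text → Spec_parse_nav_decision_py text (parse_nav_decision_py text)

-- ===== LEMMAS AND PROOFS =====

/-- proof-side: the value Source B's `last` returns for `key`, as an Option (none = default). -/
def pvFind? (rev : List (List Char)) (key : List Char) (allowed : List (List Char)) :
    Option (List Char) :=
  match rev with
  | [] => none
  | l :: rest =>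
    let u := PySem.Chars.upper l
    let v := PySem.Chars.strip (PySem.List.slice u (some (((key ++ [':']).length : Int))) none)
    if PySem.Chars.startswith u (key ++ [':']) = true ∧ allowed.contains v = true then some v
    else pvFind? rest key allowed

/-- proof-side: the value Source B's `last_reason` returns, as an Option. -/
def pvFindReason? (rev : List (List Char)) : Option String :=
  match rev with
  | [] => none
  | l :: rest =>
    if PySem.Chars.startswith (PySem.Chars.upper l) "REASON:".toList then
      some (String.ofList (PySem.Chars.strip ((PySem.Chars.splitOnMax l [':'] 1).getD 1 [])))
    else pvFindReason? rest

theorem pvLast_eq (rev : List (List Char)) (key : List Char) (allowed : List (List Char))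
    (d : String) :
    pvLast rev key allowed d =
      (match pvFind? rev key allowed with | some v => String.ofList v | none => d) := by
  induction rev with
  | nil => rfl
  | cons l rest ih =>
    simp only [pvLast, pvFind?]
    by_cases hsw : PySem.Chars.startswith (PySem.Chars.upper l) (key ++ [':']) = true
    · by_cases hc : allowed.contains (PySem.Chars.strip (PySem.List.slice
          (PySem.Chars.upper l) (some (((key ++ [':']).length : Int))) none)) = true
      · rw [if_pos hsw, if_pos hc, if_pos ⟨hsw, hc⟩]
      · rw [if_pos hsw, if_neg hc, if_neg (fun h => hc h.2), ih]
    · rw [if_neg hsw, if_neg (fun h => hsw h.1), ih]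

theorem pvLastReason_eq (rev : List (List Char)) :
    pvLastReason rev =
      (match pvFindReason? rev with | some v => v | none => "Could not parse AI response") := by
  induction rev with
  | nil => rfl
  | cons l rest ih =>
    simp only [pvLastReason, pvFindReason?]
    by_cases hsw : PySem.Chars.startswith (PySem.Chars.upper l) "REASON:".toList = true
    · rw [if_pos hsw, if_pos hsw]
    · rw [if_neg hsw, if_neg hsw, ih]

/-- `Char.ofNat` of a small scalar value reads back its code. -/
theorem pvToNat_ofNat (n : Nat) (h : n < 55296) : (Char.ofNat n).toNat = n := by
  unfold Char.ofNat
  split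
  · rfl
  · rename_i hv; exact absurd (Or.inl (by omega)) hv

/-- str.upper() turns a char into ':' iff it already was ':'. -/
theorem pvUpperChar_colon (c : Char) : PySem.Chars.upperChar c = ':' ↔ c = ':' := by
  unfold PySem.Chars.upperChar PySem.Chars.islower
  split_ifs with h
  · simp only [decide_eq_true_eq, Bool.and_eq_true] at h
    have hb : 97 ≤ c.toNat ∧ c.toNat ≤ 122 := by
      obtain ⟨h1, h2⟩ := h
      rw [Char.le_def] at h1 h2
      exact ⟨UInt32.le_iff_toNat_le.mp h1, UInt32.le_iff_toNat_le.mp h2⟩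
    constructor
    · intro hc
      have := congrArg Char.toNat hc
      rw [pvToNat_ofNat _ (by omega)] at this
      have h58 : (':' : Char).toNat = 58 := rfl
      omega
    · intro hc; subst hc
      have h58 : (':' : Char).toNat = 58 := rfl
      omega
  · exact Iff.rfl

theorem pvPrefix_colon_iff (p : List Char) : ∀ (q K : List Char), ':' ∉ p → ':' ∉ K →
    ((K ++ [':']) <+: (p ++ ':' :: q) ↔ K = p) := by
  induction p with
  | nil =>
    intro q K _ hK
    cases K with
    | nil => simp
    | cons k K' =>
      simp only [List.cons_append, List.nil_append, List.cons_prefix_cons]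
      constructor
      · rintro ⟨rfl, -⟩; exact absurd List.mem_cons_self hK
      · intro h; simp at h
  | cons c p ih =>
    intro q K hp hK
    cases K with
    | nil =>
      simp only [List.nil_append, List.cons_append, List.cons_prefix_cons]
      constructor
      · rintro ⟨h, -⟩; exact absurd (h ▸ List.mem_cons_self) hp
      · intro h; simp at h
    | cons k K' =>
      simp only [List.cons_append, List.cons_prefix_cons]
      rw [ih q K' (fun h => hp (List.mem_cons_of_mem _ h)) (fun h => hK (List.mem_cons_of_mem _ h))]
      constructor
      · rintro ⟨rfl, h⟩; rw [h]
      · intro h; injection h with h1 h2; exact ⟨h1, h2⟩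

theorem pvUpper_mem_colon (s : List Char) : ':' ∈ PySem.Chars.upper s ↔ ':' ∈ s := by
  unfold PySem.Chars.upper
  rw [List.mem_map]
  constructor
  · rintro ⟨c, hc, hu⟩; rwa [(pvUpperChar_colon c).mp hu] at hc
  · intro hc; exact ⟨':', hc, (pvUpperChar_colon ':').mpr rfl⟩

theorem pvGoZero (fuel : Nat) (q : List Char) (acc : List (List Char)) :
    PySem.Chars.splitOnMax.go [':'] fuel 0 q [] acc = (q :: acc).reverse := by
  cases fuel with
  | zero => simp [PySem.Chars.splitOnMax.go]
  | succ f => cases q with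
    | nil => simp [PySem.Chars.splitOnMax.go]
    | cons c rest => simp [PySem.Chars.splitOnMax.go]

theorem pvGoOne (p : List Char) : ∀ (fuel : Nat) (cur q : List Char) (acc : List (List Char)),
    p.length + 2 ≤ fuel → ':' ∉ p →
    PySem.Chars.splitOnMax.go [':'] fuel 1 (p ++ ':' :: q) cur acc =
      acc.reverse ++ [cur.reverse ++ p, q] := by
  induction p with
  | nil =>
    intro fuel cur q acc hf hp
    obtain ⟨f, rfl⟩ : ∃ f, fuel = f + 1 := ⟨fuel - 1, by omega⟩
    simp [PySem.Chars.splitOnMax.go, List.isPrefixOf, pvGoZero]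
  | cons c p ih =>
    intro fuel cur q acc hf hp
    obtain ⟨f, rfl⟩ : ∃ f, fuel = f + 1 := ⟨fuel - 1, by omega⟩
    have hc : c ≠ ':' := fun h => hp (h ▸ List.mem_cons_self)
    rw [show (c :: p) ++ ':' :: q = c :: (p ++ ':' :: q) from rfl]
    simp only [PySem.Chars.splitOnMax.go]
    rw [if_neg (by omega)]
    rw [if_neg (by simp [List.isPrefixOf]; exact fun h => hc h.symm)]
    rw [ih f (c :: cur) q acc (by simp at hf ⊢; omega) (fun h => hp (List.mem_cons_of_mem _ h))]
    simp

/-- `(p ++ ":" ++ q).split(":", 1) = [p, q]` when p has no ':'. -/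
theorem pvSplitOnMax_colon (p q : List Char) (hp : ':' ∉ p) :
    PySem.Chars.splitOnMax (p ++ ':' :: q) [':'] 1 = [p, q] := by
  unfold PySem.Chars.splitOnMax
  rw [if_neg (by omega)]
  have := pvGoOne p ((p ++ ':' :: q).length + 1) [] q [] (by simp) hp
  simpa using this

theorem pvNoColon_sw (u K : List Char) (h : ':' ∉ u) :
    PySem.Chars.startswith u (K ++ [':']) = false := by
  unfold PySem.Chars.startswith
  rw [Bool.eq_false_iff]
  intro hpre
  rw [List.isPrefixOf_iff_prefix] at hpre
  exact h (hpre.subset (by simp))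

/-- `startswith(K + ":")` on a line whose first ':' splits it as P ++ ':' :: q
    holds exactly when the key before the ':' is K. -/
theorem pvSW_iff (P q K : List Char) (hP : ':' ∉ P) (hK : ':' ∉ K) :
    (PySem.Chars.startswith (P ++ ':' :: q) (K ++ [':']) = true ↔ K = P) := by
  unfold PySem.Chars.startswith
  rw [List.isPrefixOf_iff_prefix]
  exact pvPrefix_colon_iff P q K hP hK

/-- every list of chars either has no ':' or splits at its first ':'. -/
theorem pvColon_cases (s : List Char) : ':' ∉ s ∨ ∃ p q, s = p ++ ':' :: q ∧ ':' ∉ p := by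
  induction s with
  | nil => left; simp
  | cons c cs ih =>
    by_cases hc : c = ':'
    · subst hc; right; exact ⟨[], cs, rfl, by simp⟩
    · rcases ih with h | ⟨p, q, rfl, hp⟩
      · left
        intro hm
        rcases List.mem_cons.mp hm with h' | h'
        · exact hc h'.symm
        · exact h h'
      · right
        refine ⟨c :: p, q, rfl, ?_⟩
        intro hm
        rcases List.mem_cons.mp hm with h' | h'
        · exact hc h'.symm
        · exact hp h'

theorem pvUpper_append_colon (p q : List Char) :
    PySem.Chars.upper (p ++ ':' :: q) =
      PySem.Chars.upper p ++ ':' :: PySem.Chars.upper q := by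
  simp [PySem.Chars.upper, show PySem.Chars.upperChar ':' = ':' from rfl]

theorem pvUpper_length (p : List Char) : (PySem.Chars.upper p).length = p.length := by
  simp [PySem.Chars.upper]

/-- a line with no ':' matches none of A's guards: the step is the identity. -/
theorem pvStepA_noColon (st : PvSt) (l : List Char) (h : ':' ∉ PySem.Chars.strip l) :
    pvStepA st l = st := by
  have hu : ':' ∉ PySem.Chars.upper (PySem.Chars.strip l) :=
    fun hm => h ((pvUpper_mem_colon _).mp hm)
  simp only [pvStepA]
  rw [show ("SAFETY:".toList : List Char) = "SAFETY".toList ++ [':'] from rfl,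
      show ("DIRECTION:".toList : List Char) = "DIRECTION".toList ++ [':'] from rfl,
      show ("OBSTACLE_TYPE:".toList : List Char) = "OBSTACLE_TYPE".toList ++ [':'] from rfl,
      show ("OBSTACLE_POSITION:".toList : List Char) = "OBSTACLE_POSITION".toList ++ [':'] from rfl,
      show ("CLEAR_PATH:".toList : List Char) = "CLEAR_PATH".toList ++ [':'] from rfl,
      show ("CONFIDENCE:".toList : List Char) = "CONFIDENCE".toList ++ [':'] from rfl,
      show ("REASON:".toList : List Char) = "REASON".toList ++ [':'] from rfl]
  simp only [pvNoColon_sw _ _ hu, Bool.false_eq_true, if_false]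


/-- full characterisation of A's loop body on a line whose first ':' splits it as p ++ ':' :: q. -/
theorem pvStepA_eq (st : PvSt) (l p q : List Char)
    (heq : PySem.Chars.strip l = p ++ ':' :: q) (hp : ':' ∉ p) :
    pvStepA st l =
      if "SAFETY".toList = PySem.Chars.upper p then
        (if (["SAFE".toList, "CAUTION".toList, "DANGER".toList]).contains (PySem.Chars.strip (PySem.Chars.upper q)) then
          { st with safety := String.ofList (PySem.Chars.strip (PySem.Chars.upper q)) } else st)
      else
      if "DIRECTION".toList = PySem.Chars.upper p then
        (if (["FORWARD".toList, "LEFT".toList, "RIGHT".toList, "STOP".toList]).contains (PySem.Chars.strip (PySem.Chars.upper q)) then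
          { st with direction := String.ofList (PySem.Chars.strip (PySem.Chars.upper q)) } else st)
      else
      if "OBSTACLE_TYPE".toList = PySem.Chars.upper p then
        (if (["WALL".toList, "ROCK".toList, "FURNITURE".toList, "PERSON".toList, "HOLE".toList,
          "STEP".toList, "VEGETATION".toList, "NONE".toList]).contains (PySem.Chars.strip (PySem.Chars.upper q)) then
          { st with obstacle_type := String.ofList (PySem.Chars.lower (PySem.Chars.strip (PySem.Chars.upper q))) } else st)
      else
      if "OBSTACLE_POSITION".toList = PySem.Chars.upper p then
        (if (["LEFT".toList, "CENTER".toList, "RIGHT".toList, "NONE".toList]).contains (PySem.Chars.strip (PySem.Chars.upper q)) then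
          { st with obstacle_position := String.ofList (PySem.Chars.lower (PySem.Chars.strip (PySem.Chars.upper q))) } else st)
      else
      if "CLEAR_PATH".toList = PySem.Chars.upper p then
        (if (["LEFT".toList, "CENTER".toList, "RIGHT".toList, "NONE".toList]).contains (PySem.Chars.strip (PySem.Chars.upper q)) then
          { st with clear_path := String.ofList (PySem.Chars.lower (PySem.Chars.strip (PySem.Chars.upper q))) } else st)
      else
      if "CONFIDENCE".toList = PySem.Chars.upper p then
        (if (["HIGH".toList, "MEDIUM".toList, "LOW".toList]).contains (PySem.Chars.strip (PySem.Chars.upper q)) then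
          { st with confidence := String.ofList (PySem.Chars.lower (PySem.Chars.strip (PySem.Chars.upper q))) } else st)
      else
      if "REASON".toList = PySem.Chars.upper p then
        { st with reason := String.ofList (PySem.Chars.strip q) }
      else st := by
  have hPnc : ':' ∉ PySem.Chars.upper p := fun hm => hp ((pvUpper_mem_colon p).mp hm)
  have hsw : ∀ K : List Char, ':' ∉ K →
      (PySem.Chars.startswith (PySem.Chars.upper p ++ ':' :: PySem.Chars.upper q)
        (K ++ [':']) = true ↔ K = PySem.Chars.upper p) :=
    fun K hK => pvSW_iff _ _ K hPnc hK
  have e1 : (PySem.Chars.startswith (PySem.Chars.upper p ++ ':' :: PySem.Chars.upper q)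
      ("SAFETY".toList ++ [':']) = true) = ("SAFETY".toList = PySem.Chars.upper p) :=
    propext (hsw _ (by decide))
  have e2 : (PySem.Chars.startswith (PySem.Chars.upper p ++ ':' :: PySem.Chars.upper q)
      ("DIRECTION".toList ++ [':']) = true) = ("DIRECTION".toList = PySem.Chars.upper p) :=
    propext (hsw _ (by decide))
  have e3 : (PySem.Chars.startswith (PySem.Chars.upper p ++ ':' :: PySem.Chars.upper q)
      ("OBSTACLE_TYPE".toList ++ [':']) = true) = ("OBSTACLE_TYPE".toList = PySem.Chars.upper p) :=
    propext (hsw _ (by decide))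
  have e4 : (PySem.Chars.startswith (PySem.Chars.upper p ++ ':' :: PySem.Chars.upper q)
      ("OBSTACLE_POSITION".toList ++ [':']) = true) = ("OBSTACLE_POSITION".toList = PySem.Chars.upper p) :=
    propext (hsw _ (by decide))
  have e5 : (PySem.Chars.startswith (PySem.Chars.upper p ++ ':' :: PySem.Chars.upper q)
      ("CLEAR_PATH".toList ++ [':']) = true) = ("CLEAR_PATH".toList = PySem.Chars.upper p) :=
    propext (hsw _ (by decide))
  have e6 : (PySem.Chars.startswith (PySem.Chars.upper p ++ ':' :: PySem.Chars.upper q)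
      ("CONFIDENCE".toList ++ [':']) = true) = ("CONFIDENCE".toList = PySem.Chars.upper p) :=
    propext (hsw _ (by decide))
  have e7 : (PySem.Chars.startswith (PySem.Chars.upper p ++ ':' :: PySem.Chars.upper q)
      ("REASON".toList ++ [':']) = true) = ("REASON".toList = PySem.Chars.upper p) :=
    propext (hsw _ (by decide))
  simp only [pvStepA, heq, pvUpper_append_colon, pvValidObstacles, pvValidPositions]
  rw [show ("SAFETY:".toList : List Char) = "SAFETY".toList ++ [':'] from rfl,
      show ("DIRECTION:".toList : List Char) = "DIRECTION".toList ++ [':'] from rfl,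
      show ("OBSTACLE_TYPE:".toList : List Char) = "OBSTACLE_TYPE".toList ++ [':'] from rfl,
      show ("OBSTACLE_POSITION:".toList : List Char) = "OBSTACLE_POSITION".toList ++ [':'] from rfl,
      show ("CLEAR_PATH:".toList : List Char) = "CLEAR_PATH".toList ++ [':'] from rfl,
      show ("CONFIDENCE:".toList : List Char) = "CONFIDENCE".toList ++ [':'] from rfl,
      show ("REASON:".toList : List Char) = "REASON".toList ++ [':'] from rfl]
  rw [pvSplitOnMax_colon _ _ hPnc, pvSplitOnMax_colon _ _ hp]
  simp only [List.getD_cons_succ, List.getD_cons_zero]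
  simp only [e1, e2, e3, e4, e5, e6, e7]


theorem pvStep_safety (st : PvSt) (l p q : List Char)
    (heq : PySem.Chars.strip l = p ++ ':' :: q) (hp : ':' ∉ p) :
    (pvStepA st l).safety =
      if PySem.Chars.upper p = "SAFETY".toList ∧
          (["SAFE".toList, "CAUTION".toList, "DANGER".toList]).contains (PySem.Chars.strip (PySem.Chars.upper q)) = true
      then String.ofList (PySem.Chars.strip (PySem.Chars.upper q)) else st.safety := by
  rw [pvStepA_eq st l p q heq hp]
  by_cases h : PySem.Chars.upper p = "SAFETY".toList
  · rw [if_pos h.symm]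
    by_cases hv : (["SAFE".toList, "CAUTION".toList, "DANGER".toList]).contains (PySem.Chars.strip (PySem.Chars.upper q)) = true
    · rw [if_pos hv, if_pos ⟨h, hv⟩]
    · rw [if_neg hv, if_neg (fun hc => hv hc.2)]
  · rw [if_neg (fun hc : ("SAFETY".toList = PySem.Chars.upper p) => h hc.symm),
        if_neg (show ¬(PySem.Chars.upper p = "SAFETY".toList ∧
          (["SAFE".toList, "CAUTION".toList, "DANGER".toList]).contains (PySem.Chars.strip (PySem.Chars.upper q)) = true) from fun hc => h hc.1)]
    split_ifs <;> rfl

theorem pvStep_direction (st : PvSt) (l p q : List Char)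
    (heq : PySem.Chars.strip l = p ++ ':' :: q) (hp : ':' ∉ p) :
    (pvStepA st l).direction =
      if PySem.Chars.upper p = "DIRECTION".toList ∧
          (["FORWARD".toList, "LEFT".toList, "RIGHT".toList, "STOP".toList]).contains (PySem.Chars.strip (PySem.Chars.upper q)) = true
      then String.ofList (PySem.Chars.strip (PySem.Chars.upper q)) else st.direction := by
  rw [pvStepA_eq st l p q heq hp]
  by_cases h : PySem.Chars.upper p = "DIRECTION".toList
  ·
    rw [if_neg (show ¬("SAFETY".toList = PySem.Chars.upper p) from
        fun hc => absurd (hc.trans h) (by decide))]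
    rw [if_pos h.symm]
    by_cases hv : (["FORWARD".toList, "LEFT".toList, "RIGHT".toList, "STOP".toList]).contains (PySem.Chars.strip (PySem.Chars.upper q)) = true
    · rw [if_pos hv, if_pos ⟨h, hv⟩]
    · rw [if_neg hv, if_neg (fun hc => hv hc.2)]
  · rw [if_neg (fun hc : ("DIRECTION".toList = PySem.Chars.upper p) => h hc.symm),
        if_neg (show ¬(PySem.Chars.upper p = "DIRECTION".toList ∧
          (["FORWARD".toList, "LEFT".toList, "RIGHT".toList, "STOP".toList]).contains (PySem.Chars.strip (PySem.Chars.upper q)) = true) from fun hc => h hc.1)]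
    split_ifs <;> rfl

theorem pvStep_obstacle_type (st : PvSt) (l p q : List Char)
    (heq : PySem.Chars.strip l = p ++ ':' :: q) (hp : ':' ∉ p) :
    (pvStepA st l).obstacle_type =
      if PySem.Chars.upper p = "OBSTACLE_TYPE".toList ∧
          (["WALL".toList, "ROCK".toList, "FURNITURE".toList, "PERSON".toList, "HOLE".toList,
          "STEP".toList, "VEGETATION".toList, "NONE".toList]).contains (PySem.Chars.strip (PySem.Chars.upper q)) = true
      then String.ofList (PySem.Chars.lower (PySem.Chars.strip (PySem.Chars.upper q))) else st.obstacle_type := by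
  rw [pvStepA_eq st l p q heq hp]
  by_cases h : PySem.Chars.upper p = "OBSTACLE_TYPE".toList
  ·
    rw [if_neg (show ¬("SAFETY".toList = PySem.Chars.upper p) from
        fun hc => absurd (hc.trans h) (by decide))]
    rw [if_neg (show ¬("DIRECTION".toList = PySem.Chars.upper p) from
        fun hc => absurd (hc.trans h) (by decide))]
    rw [if_pos h.symm]
    by_cases hv : (["WALL".toList, "ROCK".toList, "FURNITURE".toList, "PERSON".toList, "HOLE".toList,
          "STEP".toList, "VEGETATION".toList, "NONE".toList]).contains (PySem.Chars.strip (PySem.Chars.upper q)) = true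
    · rw [if_pos hv, if_pos ⟨h, hv⟩]
    · rw [if_neg hv, if_neg (fun hc => hv hc.2)]
  · rw [if_neg (fun hc : ("OBSTACLE_TYPE".toList = PySem.Chars.upper p) => h hc.symm),
        if_neg (show ¬(PySem.Chars.upper p = "OBSTACLE_TYPE".toList ∧
          (["WALL".toList, "ROCK".toList, "FURNITURE".toList, "PERSON".toList, "HOLE".toList,
          "STEP".toList, "VEGETATION".toList, "NONE".toList]).contains (PySem.Chars.strip (PySem.Chars.upper q)) = true) from fun hc => h hc.1)]
    split_ifs <;> rfl

theorem pvStep_obstacle_position (st : PvSt) (l p q : List Char)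
    (heq : PySem.Chars.strip l = p ++ ':' :: q) (hp : ':' ∉ p) :
    (pvStepA st l).obstacle_position =
      if PySem.Chars.upper p = "OBSTACLE_POSITION".toList ∧
          (["LEFT".toList, "CENTER".toList, "RIGHT".toList, "NONE".toList]).contains (PySem.Chars.strip (PySem.Chars.upper q)) = true
      then String.ofList (PySem.Chars.lower (PySem.Chars.strip (PySem.Chars.upper q))) else st.obstacle_position := by
  rw [pvStepA_eq st l p q heq hp]
  by_cases h : PySem.Chars.upper p = "OBSTACLE_POSITION".toList
  ·
    rw [if_neg (show ¬("SAFETY".toList = PySem.Chars.upper p) from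
        fun hc => absurd (hc.trans h) (by decide))]
    rw [if_neg (show ¬("DIRECTION".toList = PySem.Chars.upper p) from
        fun hc => absurd (hc.trans h) (by decide))]
    rw [if_neg (show ¬("OBSTACLE_TYPE".toList = PySem.Chars.upper p) from
        fun hc => absurd (hc.trans h) (by decide))]
    rw [if_pos h.symm]
    by_cases hv : (["LEFT".toList, "CENTER".toList, "RIGHT".toList, "NONE".toList]).contains (PySem.Chars.strip (PySem.Chars.upper q)) = true
    · rw [if_pos hv, if_pos ⟨h, hv⟩]
    · rw [if_neg hv, if_neg (fun hc => hv hc.2)]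
  · rw [if_neg (fun hc : ("OBSTACLE_POSITION".toList = PySem.Chars.upper p) => h hc.symm),
        if_neg (show ¬(PySem.Chars.upper p = "OBSTACLE_POSITION".toList ∧
          (["LEFT".toList, "CENTER".toList, "RIGHT".toList, "NONE".toList]).contains (PySem.Chars.strip (PySem.Chars.upper q)) = true) from fun hc => h hc.1)]
    split_ifs <;> rfl

theorem pvStep_clear_path (st : PvSt) (l p q : List Char)
    (heq : PySem.Chars.strip l = p ++ ':' :: q) (hp : ':' ∉ p) :
    (pvStepA st l).clear_path =
      if PySem.Chars.upper p = "CLEAR_PATH".toList ∧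
          (["LEFT".toList, "CENTER".toList, "RIGHT".toList, "NONE".toList]).contains (PySem.Chars.strip (PySem.Chars.upper q)) = true
      then String.ofList (PySem.Chars.lower (PySem.Chars.strip (PySem.Chars.upper q))) else st.clear_path := by
  rw [pvStepA_eq st l p q heq hp]
  by_cases h : PySem.Chars.upper p = "CLEAR_PATH".toList
  ·
    rw [if_neg (show ¬("SAFETY".toList = PySem.Chars.upper p) from
        fun hc => absurd (hc.trans h) (by decide))]
    rw [if_neg (show ¬("DIRECTION".toList = PySem.Chars.upper p) from
        fun hc => absurd (hc.trans h) (by decide))]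
    rw [if_neg (show ¬("OBSTACLE_TYPE".toList = PySem.Chars.upper p) from
        fun hc => absurd (hc.trans h) (by decide))]
    rw [if_neg (show ¬("OBSTACLE_POSITION".toList = PySem.Chars.upper p) from
        fun hc => absurd (hc.trans h) (by decide))]
    rw [if_pos h.symm]
    by_cases hv : (["LEFT".toList, "CENTER".toList, "RIGHT".toList, "NONE".toList]).contains (PySem.Chars.strip (PySem.Chars.upper q)) = true
    · rw [if_pos hv, if_pos ⟨h, hv⟩]
    · rw [if_neg hv, if_neg (fun hc => hv hc.2)]
  · rw [if_neg (fun hc : ("CLEAR_PATH".toList = PySem.Chars.upper p) => h hc.symm),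
        if_neg (show ¬(PySem.Chars.upper p = "CLEAR_PATH".toList ∧
          (["LEFT".toList, "CENTER".toList, "RIGHT".toList, "NONE".toList]).contains (PySem.Chars.strip (PySem.Chars.upper q)) = true) from fun hc => h hc.1)]
    split_ifs <;> rfl

theorem pvStep_confidence (st : PvSt) (l p q : List Char)
    (heq : PySem.Chars.strip l = p ++ ':' :: q) (hp : ':' ∉ p) :
    (pvStepA st l).confidence =
      if PySem.Chars.upper p = "CONFIDENCE".toList ∧
          (["HIGH".toList, "MEDIUM".toList, "LOW".toList]).contains (PySem.Chars.strip (PySem.Chars.upper q)) = true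
      then String.ofList (PySem.Chars.lower (PySem.Chars.strip (PySem.Chars.upper q))) else st.confidence := by
  rw [pvStepA_eq st l p q heq hp]
  by_cases h : PySem.Chars.upper p = "CONFIDENCE".toList
  ·
    rw [if_neg (show ¬("SAFETY".toList = PySem.Chars.upper p) from
        fun hc => absurd (hc.trans h) (by decide))]
    rw [if_neg (show ¬("DIRECTION".toList = PySem.Chars.upper p) from
        fun hc => absurd (hc.trans h) (by decide))]
    rw [if_neg (show ¬("OBSTACLE_TYPE".toList = PySem.Chars.upper p) from
        fun hc => absurd (hc.trans h) (by decide))]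
    rw [if_neg (show ¬("OBSTACLE_POSITION".toList = PySem.Chars.upper p) from
        fun hc => absurd (hc.trans h) (by decide))]
    rw [if_neg (show ¬("CLEAR_PATH".toList = PySem.Chars.upper p) from
        fun hc => absurd (hc.trans h) (by decide))]
    rw [if_pos h.symm]
    by_cases hv : (["HIGH".toList, "MEDIUM".toList, "LOW".toList]).contains (PySem.Chars.strip (PySem.Chars.upper q)) = true
    · rw [if_pos hv, if_pos ⟨h, hv⟩]
    · rw [if_neg hv, if_neg (fun hc => hv hc.2)]
  · rw [if_neg (fun hc : ("CONFIDENCE".toList = PySem.Chars.upper p) => h hc.symm),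
        if_neg (show ¬(PySem.Chars.upper p = "CONFIDENCE".toList ∧
          (["HIGH".toList, "MEDIUM".toList, "LOW".toList]).contains (PySem.Chars.strip (PySem.Chars.upper q)) = true) from fun hc => h hc.1)]
    split_ifs <;> rfl

theorem pvStepA_reason (st : PvSt) (l p q : List Char)
    (heq : PySem.Chars.strip l = p ++ ':' :: q) (hp : ':' ∉ p) :
    (pvStepA st l).reason =
      if PySem.Chars.upper p = "REASON".toList
      then String.ofList (PySem.Chars.strip q) else st.reason := by
  rw [pvStepA_eq st l p q heq hp]
  by_cases h : PySem.Chars.upper p = "REASON".toList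
  ·
    rw [if_neg (show ¬("SAFETY".toList = PySem.Chars.upper p) from
        fun hc => absurd (hc.trans h) (by decide))]
    rw [if_neg (show ¬("DIRECTION".toList = PySem.Chars.upper p) from
        fun hc => absurd (hc.trans h) (by decide))]
    rw [if_neg (show ¬("OBSTACLE_TYPE".toList = PySem.Chars.upper p) from
        fun hc => absurd (hc.trans h) (by decide))]
    rw [if_neg (show ¬("OBSTACLE_POSITION".toList = PySem.Chars.upper p) from
        fun hc => absurd (hc.trans h) (by decide))]
    rw [if_neg (show ¬("CLEAR_PATH".toList = PySem.Chars.upper p) from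
        fun hc => absurd (hc.trans h) (by decide))]
    rw [if_neg (show ¬("CONFIDENCE".toList = PySem.Chars.upper p) from
        fun hc => absurd (hc.trans h) (by decide))]
    rw [if_pos h.symm, if_pos h]
  · rw [if_neg (fun hc : ("REASON".toList = PySem.Chars.upper p) => h hc.symm), if_neg h]
    split_ifs <;> rfl

/-- generic backward-search characterisation of one field of A's forward fold. -/
theorem pvFold_field (f : PvSt → String) (K : List Char) (allowed : List (List Char))
    (post : List Char → String) (hK : ':' ∉ K)
    (hstep : ∀ st l p q, PySem.Chars.strip l = p ++ ':' :: q → ':' ∉ p →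
      f (pvStepA st l) =
        if PySem.Chars.upper p = K ∧
            allowed.contains (PySem.Chars.strip (PySem.Chars.upper q)) = true
        then post (PySem.Chars.strip (PySem.Chars.upper q)) else f st)
    (lines : List (List Char)) (st : PvSt) :
    f (lines.foldl pvStepA st) =
      (match pvFind? ((lines.map PySem.Chars.strip).reverse) K allowed with
       | some v => post v | none => f st) := by
  induction lines using List.reverseRecOn with
  | nil => rfl
  | append_singleton ls l ih =>
    rw [List.foldl_append, List.map_append, List.reverse_append]
    simp only [List.foldl_cons, List.foldl_nil, List.map_cons, List.map_nil,
      List.reverse_cons, List.reverse_nil, List.nil_append, List.singleton_append]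
    rcases pvColon_cases (PySem.Chars.strip l) with hnc | ⟨p, q, heq, hp⟩
    · rw [pvStepA_noColon _ _ hnc, ih]
      simp only [pvFind?]
      rw [if_neg (fun hco => by
        have hx : ':' ∉ PySem.Chars.upper (PySem.Chars.strip l) :=
          fun hm => hnc ((pvUpper_mem_colon _).mp hm)
        rw [pvNoColon_sw _ _ hx] at hco
        exact absurd hco.1 (by simp))]
    · have hPnc : ':' ∉ PySem.Chars.upper p := fun hm => hp ((pvUpper_mem_colon p).mp hm)
      rw [hstep _ _ _ _ heq hp]
      simp only [pvFind?, heq, pvUpper_append_colon]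
      by_cases hKp : PySem.Chars.upper p = K
      · have hval : PySem.List.slice (PySem.Chars.upper p ++ ':' :: PySem.Chars.upper q)
            (some (((K ++ [':']).length : Int))) none = PySem.Chars.upper q := by
          rw [PySem.List.slice_from_natCast]
          rw [show PySem.Chars.upper p ++ ':' :: PySem.Chars.upper q
              = (PySem.Chars.upper p ++ [':']) ++ PySem.Chars.upper q by simp]
          rw [show (K ++ [':']).length = (PySem.Chars.upper p ++ [':']).length by
            simp [pvUpper_length, ← hKp]]
          exact List.drop_left
        rw [hval]
        by_cases hc : allowed.contains (PySem.Chars.strip (PySem.Chars.upper q)) = true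
        · rw [if_pos ⟨hKp, hc⟩,
            if_pos ⟨(pvSW_iff _ (PySem.Chars.upper q) K hPnc hK).mpr hKp.symm, hc⟩]
        · rw [if_neg (fun hx => hc hx.2), if_neg (fun hx => hc hx.2), ih]
      · rw [if_neg (fun hx => hKp hx.1), ih,
          if_neg (fun hx => hKp ((pvSW_iff _ (PySem.Chars.upper q) K hPnc hK).mp hx.1).symm)]

/-- backward-search characterisation of A's reason field. -/
theorem pvFold_reason (lines : List (List Char)) (st : PvSt) :
    (lines.foldl pvStepA st).reason =
      (match pvFindReason? ((lines.map PySem.Chars.strip).reverse) with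
       | some v => v | none => st.reason) := by
  induction lines using List.reverseRecOn with
  | nil => rfl
  | append_singleton ls l ih =>
    rw [List.foldl_append, List.map_append, List.reverse_append]
    simp only [List.foldl_cons, List.foldl_nil, List.map_cons, List.map_nil,
      List.reverse_cons, List.reverse_nil, List.nil_append, List.singleton_append]
    rcases pvColon_cases (PySem.Chars.strip l) with hnc | ⟨p, q, heq, hp⟩
    · rw [pvStepA_noColon _ _ hnc, ih]
      simp only [pvFindReason?]
      rw [show ("REASON:".toList : List Char) = "REASON".toList ++ [':'] from rfl,
        pvNoColon_sw _ _ (fun hm => hnc ((pvUpper_mem_colon _).mp hm))]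
      simp
    · have hPnc : ':' ∉ PySem.Chars.upper p := fun hm => hp ((pvUpper_mem_colon p).mp hm)
      rw [pvStepA_reason _ _ _ _ heq hp]
      simp only [pvFindReason?, heq]
      rw [pvSplitOnMax_colon _ _ hp]
      simp only [List.getD_cons_succ, List.getD_cons_zero]
      rw [pvUpper_append_colon,
        show ("REASON:".toList : List Char) = "REASON".toList ++ [':'] from rfl]
      by_cases hKp : PySem.Chars.upper p = "REASON".toList
      · rw [if_pos hKp,
          if_pos ((pvSW_iff _ (PySem.Chars.upper q) _ hPnc (by decide)).mpr hKp.symm)]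
      · rw [if_neg hKp, ih,
          if_neg (fun hx => hKp ((pvSW_iff _ (PySem.Chars.upper q) _ hPnc (by decide)).mp hx).symm)]

/-- componentwise assembly: A's rendered fold equals B's seven backward searches. -/
theorem pvMain (lines : List (List Char)) :
    pvRender (lines.foldl pvStepA pvDefaults) =
      [("safety", pvLast ((lines.map PySem.Chars.strip).reverse) "SAFETY".toList
          ["SAFE".toList, "CAUTION".toList, "DANGER".toList] "DANGER"),
       ("direction", pvLast ((lines.map PySem.Chars.strip).reverse) "DIRECTION".toList
          ["FORWARD".toList, "LEFT".toList, "RIGHT".toList, "STOP".toList] "STOP"),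
       ("obstacle_type", PySem.Str.lower (pvLast ((lines.map PySem.Chars.strip).reverse)
          "OBSTACLE_TYPE".toList
          ["WALL".toList, "ROCK".toList, "FURNITURE".toList, "PERSON".toList, "HOLE".toList,
           "STEP".toList, "VEGETATION".toList, "NONE".toList] "UNKNOWN")),
       ("obstacle_position", PySem.Str.lower (pvLast ((lines.map PySem.Chars.strip).reverse)
          "OBSTACLE_POSITION".toList
          ["LEFT".toList, "CENTER".toList, "RIGHT".toList, "NONE".toList] "UNKNOWN")),
       ("clear_path", PySem.Str.lower (pvLast ((lines.map PySem.Chars.strip).reverse)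
          "CLEAR_PATH".toList
          ["LEFT".toList, "CENTER".toList, "RIGHT".toList, "NONE".toList] "UNKNOWN")),
       ("confidence", PySem.Str.lower (pvLast ((lines.map PySem.Chars.strip).reverse)
          "CONFIDENCE".toList
          ["HIGH".toList, "MEDIUM".toList, "LOW".toList] "LOW")),
       ("reason", pvLastReason ((lines.map PySem.Chars.strip).reverse))] := by
  have h1 : (lines.foldl pvStepA pvDefaults).safety =
      pvLast ((lines.map PySem.Chars.strip).reverse) "SAFETY".toList
        ["SAFE".toList, "CAUTION".toList, "DANGER".toList] "DANGER" := by
    rw [pvFold_field PvSt.safety "SAFETY".toList _ String.ofList (by decide)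
      pvStep_safety lines pvDefaults, pvLast_eq]
    cases pvFind? ((lines.map PySem.Chars.strip).reverse) "SAFETY".toList
      ["SAFE".toList, "CAUTION".toList, "DANGER".toList] <;> rfl
  have h2 : (lines.foldl pvStepA pvDefaults).direction =
      pvLast ((lines.map PySem.Chars.strip).reverse) "DIRECTION".toList
        ["FORWARD".toList, "LEFT".toList, "RIGHT".toList, "STOP".toList] "STOP" := by
    rw [pvFold_field PvSt.direction "DIRECTION".toList _ String.ofList (by decide)
      pvStep_direction lines pvDefaults, pvLast_eq]
    cases pvFind? ((lines.map PySem.Chars.strip).reverse) "DIRECTION".toList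
      ["FORWARD".toList, "LEFT".toList, "RIGHT".toList, "STOP".toList] <;> rfl
  have h3 : (lines.foldl pvStepA pvDefaults).obstacle_type =
      PySem.Str.lower (pvLast ((lines.map PySem.Chars.strip).reverse) "OBSTACLE_TYPE".toList
        ["WALL".toList, "ROCK".toList, "FURNITURE".toList, "PERSON".toList, "HOLE".toList,
         "STEP".toList, "VEGETATION".toList, "NONE".toList] "UNKNOWN") := by
    rw [pvFold_field PvSt.obstacle_type "OBSTACLE_TYPE".toList _
      (fun v => String.ofList (PySem.Chars.lower v)) (by decide)
      pvStep_obstacle_type lines pvDefaults, pvLast_eq]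
    cases pvFind? ((lines.map PySem.Chars.strip).reverse) "OBSTACLE_TYPE".toList
        ["WALL".toList, "ROCK".toList, "FURNITURE".toList, "PERSON".toList, "HOLE".toList,
         "STEP".toList, "VEGETATION".toList, "NONE".toList] with
    | none => decide
    | some v => simp [PySem.Str.lower]
  have h4 : (lines.foldl pvStepA pvDefaults).obstacle_position =
      PySem.Str.lower (pvLast ((lines.map PySem.Chars.strip).reverse)
        "OBSTACLE_POSITION".toList
        ["LEFT".toList, "CENTER".toList, "RIGHT".toList, "NONE".toList] "UNKNOWN") := by
    rw [pvFold_field PvSt.obstacle_position "OBSTACLE_POSITION".toList _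
      (fun v => String.ofList (PySem.Chars.lower v)) (by decide)
      pvStep_obstacle_position lines pvDefaults, pvLast_eq]
    cases pvFind? ((lines.map PySem.Chars.strip).reverse) "OBSTACLE_POSITION".toList
        ["LEFT".toList, "CENTER".toList, "RIGHT".toList, "NONE".toList] with
    | none => decide
    | some v => simp [PySem.Str.lower]
  have h5 : (lines.foldl pvStepA pvDefaults).clear_path =
      PySem.Str.lower (pvLast ((lines.map PySem.Chars.strip).reverse) "CLEAR_PATH".toList
        ["LEFT".toList, "CENTER".toList, "RIGHT".toList, "NONE".toList] "UNKNOWN") := by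
    rw [pvFold_field PvSt.clear_path "CLEAR_PATH".toList _
      (fun v => String.ofList (PySem.Chars.lower v)) (by decide)
      pvStep_clear_path lines pvDefaults, pvLast_eq]
    cases pvFind? ((lines.map PySem.Chars.strip).reverse) "CLEAR_PATH".toList
        ["LEFT".toList, "CENTER".toList, "RIGHT".toList, "NONE".toList] with
    | none => decide
    | some v => simp [PySem.Str.lower]
  have h6 : (lines.foldl pvStepA pvDefaults).confidence =
      PySem.Str.lower (pvLast ((lines.map PySem.Chars.strip).reverse) "CONFIDENCE".toList
        ["HIGH".toList, "MEDIUM".toList, "LOW".toList] "LOW") := by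
    rw [pvFold_field PvSt.confidence "CONFIDENCE".toList _
      (fun v => String.ofList (PySem.Chars.lower v)) (by decide)
      pvStep_confidence lines pvDefaults, pvLast_eq]
    cases pvFind? ((lines.map PySem.Chars.strip).reverse) "CONFIDENCE".toList
        ["HIGH".toList, "MEDIUM".toList, "LOW".toList] with
    | none => decide
    | some v => simp [PySem.Str.lower]
  have h7 : (lines.foldl pvStepA pvDefaults).reason =
      pvLastReason ((lines.map PySem.Chars.strip).reverse) := by
    rw [pvFold_reason, pvLastReason_eq]
    cases pvFindReason? ((lines.map PySem.Chars.strip).reverse) <;> rfl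
  simp only [pvRender, h1, h2, h3, h4, h5, h6, h7]

-- ===== VERDICT (by name: the statement is the Claim_ definition above) =====
theorem parse_nav_decision_py_spec : Claim_equal_parse_nav_decision_py := by
  intro text _
  unfold Spec_parse_nav_decision_py
  simp only [parse_nav_decision_py, parse_nav_decision_py_alt,
    PySem.List.slice?_none_none_neg_one, Option.getD_some]
  by_cases h : text.toList = []
  · rw [if_pos h, h]
    decide
  · rw [if_neg h]
    exact pvMain _
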